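-- pv_equiv track=rewrite | github.com/diegonhd/data-structures-visualizer | src/tries.py | _first_bit_diff
-- ===== SOURCE A (Python) =====
-- def _first_bit_diff(key1, key2):
--     """
--     Encontra o índice do primeiro bit diferente entre duas chaves.
--     Auxiliar essencial para a Inserção.
--     """
--     len1, len2 = len(key1), len(key2)
--     max_len = max(len1, len2)
--
--     # Itera byte a byte (caractere a caractere)
--     for i in range(max_len):
--         # Obtém valor ASCII ou 0 se acabou a string
--         b1 = ord(key1[i]) if i < len1 else 0
--         b2 = ord(key2[i]) if i < len2 else 0
--
--         if b1 != b2: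
--             # Se os bytes são diferentes, achamos qual bit difere
--             xor_val = b1 ^ b2
--             # Varre do bit mais significativo (7) ao menos (0)
--             for bit in range(7, -1, -1):
--                 if (xor_val >> bit) & 1:
--                     return (i * 8) + (7 - bit)
--     return -1 # Chaves iguais
-- ===== SOURCE B (Python) =====
-- def _first_bit_diff(key1, key2):
--     len1, len2 = len(key1), len(key2)
--     max_len = max(len1, len2)
--     # pack each key big-endian into one integer, low-end padded to max_len bytes
--     v1 = int.from_bytes(bytes(ord(c) & 0xFF for c in key1), 'big') << ((max_len - len1) * 8)
--     v2 = int.from_bytes(bytes(ord(c) & 0xFF for c in key2), 'big') << ((max_len - len2) * 8)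
--     x = v1 ^ v2
--     if x == 0:
--         return -1
--     return max_len * 8 - x.bit_length()
-- ===== Notes on version B (the rewrite author's own statement) =====
-- stated objective: alternative
-- what changed: Replaces the byte-by-byte scan with an inner MSB-to-LSB bit loop by packing each key into one big integer (big-endian, low-end padded to the common byte width), XOR-ing the two integers and reading the answer off a single bit_length call.
import Mathlib
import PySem

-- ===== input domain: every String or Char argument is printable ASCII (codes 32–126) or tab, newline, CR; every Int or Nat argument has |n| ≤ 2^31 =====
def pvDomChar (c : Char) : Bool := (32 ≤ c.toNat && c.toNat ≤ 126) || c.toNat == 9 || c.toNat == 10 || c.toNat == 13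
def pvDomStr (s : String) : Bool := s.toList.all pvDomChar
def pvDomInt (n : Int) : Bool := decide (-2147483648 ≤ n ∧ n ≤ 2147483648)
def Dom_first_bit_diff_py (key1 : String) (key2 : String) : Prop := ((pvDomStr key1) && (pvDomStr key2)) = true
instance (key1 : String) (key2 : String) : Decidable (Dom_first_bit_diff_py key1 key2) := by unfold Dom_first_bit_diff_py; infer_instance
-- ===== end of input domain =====

-- B replaces A's byte-by-byte scan with an inner MSB-to-LSB bit loop by packing each key
-- into one big integer (padded to the common byte width), XOR-ing them and reading the
-- answer off a single bit_length computation (alternative decomposition, same cost).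

-- ===== PORT A =====
-- inner loop `for bit in range(7, -1, -1): if (xor_val >> bit) & 1: return ...`
def pvBitScan (x : Nat) : List Nat → Option Nat
  | [] => none
  | b :: rest => if (x >>> b) &&& 1 = 1 then some b else pvBitScan x rest

-- body of one outer-loop iteration: `if b1 != b2: ...` (some r = return r, none = continue)
def pvCheckByte (i b1 b2 : Nat) : Option Int :=
  if b1 ≠ b2 then
    match pvBitScan (b1 ^^^ b2) [7, 6, 5, 4, 3, 2, 1, 0] with
    | some bit => some ((i : Int) * 8 + (7 - (bit : Int)))
    | none => none
  else none

-- outer loop `for i in range(max_len)`: byte i of each key is its head (0 past the end);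
-- both lists empty = i reached max_len, fall through to `return -1`.
def pvALoop (i : Nat) : List Char → List Char → Int
  | [], [] => -1
  | c1 :: t1, c2 :: t2 =>
    match pvCheckByte i c1.toNat c2.toNat with
    | some r => r
    | none => pvALoop (i + 1) t1 t2
  | c1 :: t1, [] =>
    match pvCheckByte i c1.toNat 0 with
    | some r => r
    | none => pvALoop (i + 1) t1 []
  | [], c2 :: t2 =>
    match pvCheckByte i 0 c2.toNat with
    | some r => r
    | none => pvALoop (i + 1) [] t2
termination_by l1 l2 => l1.length + l2.length

def first_bit_diff_py (key1 : String) (key2 : String) : Int :=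
  pvALoop 0 key1.toList key2.toList

-- ===== PORT B =====
-- `v = 0; for c in key: v = (v << 8) | (ord(c) & 0xFF)`
def pvEnc (l : List Char) : Nat := l.foldl (fun v c => (v <<< 8) ||| (c.toNat &&& 255)) 0

def first_bit_diff_py_alt (key1 : String) (key2 : String) : Int :=
  let l1 := key1.toList
  let l2 := key2.toList
  let maxLen := max l1.length l2.length
  let v1 := pvEnc l1 <<< ((maxLen - l1.length) * 8)
  let v2 := pvEnc l2 <<< ((maxLen - l2.length) * 8)
  let x := v1 ^^^ v2
  if x = 0 then -1 else (maxLen * 8 : Int) - (Nat.size x : Int)  -- Nat.size = Python int.bit_length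

-- ===== PRECONDITION & SPEC =====
def Spec_first_bit_diff_py (key1 : String) (key2 : String) (out : Int) : Prop := out = first_bit_diff_py_alt key1 key2
instance (key1 : String) (key2 : String) (out : Int) : Decidable (Spec_first_bit_diff_py key1 key2 out) := by unfold Spec_first_bit_diff_py; infer_instance

-- ===== CLAIM (what is proved, stated in full; the proofs are below) =====
def Claim_equal_first_bit_diff_py : Prop := ∀ (key1 : String) (key2 : String), Dom_first_bit_diff_py key1 key2 → Spec_first_bit_diff_py key1 key2 (first_bit_diff_py key1 key2)

-- ===== LEMMAS AND PROOFS =====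

-- bit i of (a*2^k + r) for r < 2^k
theorem pv_testBit_split (a r k i : Nat) (h : r < 2 ^ k) :
    (a * 2 ^ k + r).testBit i = if i < k then r.testBit i else a.testBit (i - k) := by
  rcases Nat.lt_or_ge i k with hi | hi
  · simp only [if_pos hi]
    rw [Nat.testBit_eq_decide_div_mod_eq, Nat.testBit_eq_decide_div_mod_eq]
    have : a * 2 ^ k = a * 2 ^ (k - i) * 2 ^ i := by
      rw [mul_assoc, ← pow_add]
      congr 2
      omega
    rw [this, Nat.add_comm, Nat.add_mul_div_right _ _ (Nat.two_pow_pos i)]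
    have he : ∃ m, a * 2 ^ (k - i) = 2 * m := by
      refine ⟨a * 2 ^ (k - i - 1), ?_⟩
      have : 2 ^ (k - i) = 2 * 2 ^ (k - i - 1) := by
        rw [← pow_succ']
        congr 1
        omega
      rw [this]; ring
    obtain ⟨m, hm⟩ := he
    rw [hm, Nat.add_mul_mod_self_left]
  · simp only [if_neg (Nat.not_lt.mpr hi)]
    rw [Nat.testBit_eq_decide_div_mod_eq, Nat.testBit_eq_decide_div_mod_eq]
    have hk : (2 : Nat) ^ i = 2 ^ k * 2 ^ (i - k) := by rw [← pow_add]; congr 1; omega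
    rw [hk, ← Nat.div_div_eq_div_mul]
    have : (a * 2 ^ k + r) / 2 ^ k = a := by
      rw [Nat.add_comm, Nat.add_mul_div_right _ _ (Nat.two_pow_pos k), Nat.div_eq_of_lt h]
      omega
    rw [this]

theorem pv_or_low (v t k : Nat) (h : t < 2 ^ k) : (v <<< k) ||| t = v * 2 ^ k + t := by
  apply Nat.eq_of_testBit_eq
  intro i
  rw [Nat.testBit_lor, Nat.testBit_shiftLeft, pv_testBit_split v t k i h]
  rcases Nat.lt_or_ge i k with hi | hi
  · simp [if_pos hi, Nat.not_le.mpr hi]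
  · have ht : t.testBit i = false :=
      Nat.testBit_eq_false_of_lt (lt_of_lt_of_le h (Nat.pow_le_pow_right (by norm_num) hi))
    simp [if_neg (Nat.not_lt.mpr hi), hi, ht]

theorem pv_xor_lt (r1 r2 k : Nat) (h1 : r1 < 2 ^ k) (h2 : r2 < 2 ^ k) : r1 ^^^ r2 < 2 ^ k :=
  Nat.xor_lt_two_pow h1 h2

theorem pv_xor_split (a b r1 r2 k : Nat) (h1 : r1 < 2 ^ k) (h2 : r2 < 2 ^ k) :
    (a * 2 ^ k + r1) ^^^ (b * 2 ^ k + r2) = (a ^^^ b) * 2 ^ k + (r1 ^^^ r2) := by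
  apply Nat.eq_of_testBit_eq
  intro i
  rw [Nat.testBit_xor, pv_testBit_split a r1 k i h1, pv_testBit_split b r2 k i h2,
    pv_testBit_split (a ^^^ b) (r1 ^^^ r2) k i (pv_xor_lt r1 r2 k h1 h2)]
  rcases Nat.lt_or_ge i k with hi | hi
  · simp [if_pos hi, Nat.testBit_xor]
  · simp [if_neg (Nat.not_lt.mpr hi), Nat.testBit_xor]

theorem pv_size_split (a r k : Nat) (ha : 0 < a) (h : r < 2 ^ k) :
    (a * 2 ^ k + r).size = a.size + k := by
  apply Nat.le_antisymm
  · rw [Nat.size_le]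
    have h1 : a + 1 ≤ 2 ^ a.size := Nat.lt_size_self a
    calc a * 2 ^ k + r < (a + 1) * 2 ^ k := by
            have hp := Nat.two_pow_pos k
            nlinarith
      _ ≤ 2 ^ a.size * 2 ^ k := Nat.mul_le_mul_right _ h1
      _ = 2 ^ (a.size + k) := by rw [← pow_add]
  · have hs : 0 < a.size := Nat.size_pos.mpr ha
    have h2 : 2 ^ (a.size - 1) ≤ a := Nat.lt_size.mp (by omega)
    have : a.size - 1 + k < (a * 2 ^ k + r).size := by
      rw [Nat.lt_size, pow_add]
      calc 2 ^ (a.size - 1) * 2 ^ k ≤ a * 2 ^ k := Nat.mul_le_mul_right _ h2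
        _ ≤ a * 2 ^ k + r := Nat.le_add_right _ _
    omega

set_option maxRecDepth 4000 in
theorem pv_bitScan_size : ∀ d < 256, 0 < d →
    pvBitScan d [7, 6, 5, 4, 3, 2, 1, 0] = some (d.size - 1) := by
  decide

theorem pv_checkByte_spec (i b1 b2 : Nat) (h1 : b1 < 256) (h2 : b2 < 256) :
    pvCheckByte i b1 b2 =
      if b1 = b2 then none
      else some ((i : Int) * 8 + (8 - ((b1 ^^^ b2).size : Int))) := by
  unfold pvCheckByte
  by_cases hb : b1 = b2
  · simp [hb]
  · have hd : b1 ^^^ b2 < 256 := pv_xor_lt b1 b2 8 h1 h2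
    have hd0 : 0 < b1 ^^^ b2 := Nat.pos_of_ne_zero (Nat.xor_ne_zero.mpr hb)
    have hs : 0 < (b1 ^^^ b2).size := Nat.size_pos.mpr hd0
    rw [pv_bitScan_size _ hd hd0]
    simp only [if_neg hb, if_pos hb, ne_eq, hb, not_false_eq_true, ite_true]
    congr 1
    have : (((b1 ^^^ b2).size - 1 : Nat) : Int) = ((b1 ^^^ b2).size : Int) - 1 := by
      omega
    rw [this]
    ring

-- mathematical value of a key aligned to width m bytes (m ≥ length)
def pvVal : List Char → Nat → Nat
  | [], _ => 0
  | c :: t, m => c.toNat * 256 ^ (m - 1) + pvVal t (m - 1)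

theorem pv_val_lt (l : List Char) (m : Nat) (hb : ∀ c ∈ l, c.toNat < 256) (hm : l.length ≤ m) :
    pvVal l m < 256 ^ m := by
  induction l generalizing m with
  | nil => simpa [pvVal] using Nat.pos_pow_of_pos m (by norm_num)
  | cons c t ih =>
    have hm1 : 1 ≤ m := by simpa using Nat.le_trans (by simp) hm
    have hc : c.toNat < 256 := hb c (by simp)
    have ht : pvVal t (m - 1) < 256 ^ (m - 1) := by
      refine ih (m - 1) (fun x hx => hb x (List.mem_cons_of_mem _ hx)) ?_
      have := hm
      simp only [List.length_cons] at this
      omega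
    have hpow : (256 : Nat) ^ m = 256 * 256 ^ (m - 1) := by
      rw [← pow_succ']
      congr 1
      omega
    calc pvVal (c :: t) m = c.toNat * 256 ^ (m - 1) + pvVal t (m - 1) := rfl
      _ < c.toNat * 256 ^ (m - 1) + 256 ^ (m - 1) := by omega
      _ = (c.toNat + 1) * 256 ^ (m - 1) := by ring
      _ ≤ 256 * 256 ^ (m - 1) := Nat.mul_le_mul_right _ (by omega)
      _ = 256 ^ m := hpow.symm

-- the same fold written arithmetically
def pvE (l : List Char) : Nat := l.foldl (fun v c => v * 256 + c.toNat) 0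

theorem pv_enc_aux (l : List Char) (hb : ∀ c ∈ l, c.toNat < 256) :
    ∀ v : Nat, l.foldl (fun v c => (v <<< 8) ||| (c.toNat &&& 255)) v
      = l.foldl (fun v c => v * 256 + c.toNat) v := by
  induction l with
  | nil => intro v; rfl
  | cons c t ih =>
    intro v
    have hc : c.toNat < 256 := hb c (by simp)
    have hstep : (v <<< 8) ||| (c.toNat &&& 255) = v * 256 + c.toNat := by
      have h255 : c.toNat &&& 255 = c.toNat := by
        rw [show (255 : Nat) = 2 ^ 8 - 1 from rfl, Nat.and_two_pow_sub_one_eq_mod,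
          Nat.mod_eq_of_lt hc]
      rw [h255, pv_or_low v c.toNat 8 hc]
      norm_num
    simp only [List.foldl_cons, hstep]
    exact ih (fun x hx => hb x (by simp [hx])) _

theorem pv_enc_eq (l : List Char) (hb : ∀ c ∈ l, c.toNat < 256) : pvEnc l = pvE l :=
  pv_enc_aux l hb 0

theorem pv_E_acc (l : List Char) : ∀ v : Nat,
    l.foldl (fun v c => v * 256 + c.toNat) v = v * 256 ^ l.length + pvE l := by
  induction l with
  | nil => intro v; simp [pvE]
  | cons c t ih =>
    intro v
    rw [List.foldl_cons, ih (v * 256 + c.toNat)]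
    have h2 : pvE (c :: t) = c.toNat * 256 ^ t.length + pvE t := by
      simp only [pvE, List.foldl_cons]
      rw [show (0 : Nat) * 256 + c.toNat = c.toNat by omega, ih c.toNat]
      rfl
    rw [h2, List.length_cons, pow_succ]
    ring

theorem pv_E_cons (c : Char) (t : List Char) :
    pvE (c :: t) = c.toNat * 256 ^ t.length + pvE t := by
  simp only [pvE, List.foldl_cons]
  rw [show (0 : Nat) * 256 + c.toNat = c.toNat by omega, pv_E_acc t c.toNat]
  rfl

theorem pv_val_eq_enc (l : List Char) (j : Nat) :
    pvVal l (l.length + j) = pvE l * 256 ^ j := by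
  induction l generalizing j with
  | nil => simp [pvVal, pvE]
  | cons c t ih =>
    have hm : (c :: t).length + j - 1 = t.length + j := by simp
    simp only [pvVal, hm]
    rw [ih j, pv_E_cons, pow_add]
    ring

theorem pv_step (i b1 b2 : Nat) (h1 : b1 < 256) (h2 : b2 < 256)
    (t1 t2 : List Char) (m : Nat)
    (hV1 : pvVal t1 m < 2 ^ (8 * m)) (hV2 : pvVal t2 m < 2 ^ (8 * m)) (rec : Int)
    (hrec : rec = (if pvVal t1 m ^^^ pvVal t2 m = 0 then -1
        else ((i + 1 : Nat) : Int) * 8 + ((m : Int) * 8 - ((pvVal t1 m ^^^ pvVal t2 m).size : Int)))) :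
    (match pvCheckByte i b1 b2 with | some r => r | none => rec) =
      (if (b1 * 2 ^ (8 * m) + pvVal t1 m) ^^^ (b2 * 2 ^ (8 * m) + pvVal t2 m) = 0 then -1
       else (i : Int) * 8 + (((m + 1 : Nat) : Int) * 8
          - (((b1 * 2 ^ (8 * m) + pvVal t1 m) ^^^ (b2 * 2 ^ (8 * m) + pvVal t2 m)).size : Int))) := by
  rw [pv_checkByte_spec i b1 b2 h1 h2, pv_xor_split b1 b2 _ _ _ hV1 hV2]
  by_cases hb : b1 = b2
  · subst hb
    simp only [if_pos rfl, Nat.xor_self, Nat.zero_mul, Nat.zero_add]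
    rw [hrec]
    by_cases hX : pvVal t1 m ^^^ pvVal t2 m = 0
    · simp [hX]
    · simp only [if_neg hX]
      push_cast
      ring
  · have hd0 : 0 < b1 ^^^ b2 := Nat.pos_of_ne_zero (Nat.xor_ne_zero.mpr hb)
    have hXne : (b1 ^^^ b2) * 2 ^ (8 * m) + (pvVal t1 m ^^^ pvVal t2 m) ≠ 0 := by
      have := Nat.two_pow_pos (8 * m)
      have : 1 * 1 ≤ (b1 ^^^ b2) * 2 ^ (8 * m) := Nat.mul_le_mul hd0 this
      omega
    rw [if_neg hb, if_neg hXne,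
      pv_size_split (b1 ^^^ b2) (pvVal t1 m ^^^ pvVal t2 m) (8 * m) hd0
        (pv_xor_lt _ _ _ hV1 hV2)]
    push_cast
    ring

-- pvVal of a cons, with the power rewritten to base 2
theorem pv_val_cons (c : Char) (t : List Char) (m : Nat) :
    pvVal (c :: t) (m + 1) = c.toNat * 2 ^ (8 * m) + pvVal t m := by
  have hpow : (256 : Nat) ^ m = 2 ^ (8 * m) := by
    rw [show (256 : Nat) = 2 ^ 8 from rfl, ← pow_mul]
  simp [pvVal, hpow]

theorem pv_val_bound (l : List Char) (m : Nat) (hb : ∀ c ∈ l, c.toNat < 256)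
    (hm : l.length ≤ m) : pvVal l m < 2 ^ (8 * m) := by
  have hpow : (256 : Nat) ^ m = 2 ^ (8 * m) := by
    rw [show (256 : Nat) = 2 ^ 8 from rfl, ← pow_mul]
  rw [← hpow]
  exact pv_val_lt l m hb hm

theorem pv_main (n : Nat) : ∀ (l1 l2 : List Char), l1.length + l2.length ≤ n →
    (∀ c ∈ l1, c.toNat < 256) → (∀ c ∈ l2, c.toNat < 256) → ∀ i : Nat,
    pvALoop i l1 l2 =
      (if pvVal l1 (max l1.length l2.length) ^^^ pvVal l2 (max l1.length l2.length) = 0 then -1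
       else (i : Int) * 8 + ((Nat.cast (max l1.length l2.length) : Int) * 8
              - ((pvVal l1 (max l1.length l2.length) ^^^ pvVal l2 (max l1.length l2.length)).size : Int))) := by
  induction n with
  | zero =>
    intro l1 l2 hlen hb1 hb2 i
    have h1 : l1 = [] := by cases l1 <;> simp_all
    have h2 : l2 = [] := by cases l2 <;> simp_all
    subst h1; subst h2
    simp [pvALoop, pvVal]
  | succ n IH =>
    intro l1 l2 hlen hb1 hb2 i
    rcases l1 with _ | ⟨c1, t1⟩ <;> rcases l2 with _ | ⟨c2, t2⟩
    · simp [pvALoop, pvVal]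
    · -- [] vs c2 :: t2
      have hlen' : ([] : List Char).length + t2.length ≤ n := by
        simp only [List.length_nil, List.length_cons] at hlen ⊢; omega
      have hM : max ([] : List Char).length (c2 :: t2).length
          = max ([] : List Char).length t2.length + 1 := by
        simp only [List.length_nil, List.length_cons]; omega
      have hm2 : t2.length ≤ max ([] : List Char).length t2.length := le_max_right _ _
      have hm1 : ([] : List Char).length ≤ max ([] : List Char).length t2.length :=
        le_max_left _ _
      have hb2' : ∀ c ∈ t2, c.toNat < 256 := fun x hx => hb2 x (List.mem_cons_of_mem _ hx)
      rw [pvALoop, hM, pv_val_cons c2 t2,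
        show pvVal [] (max ([] : List Char).length t2.length + 1)
            = 0 * 2 ^ (8 * max ([] : List Char).length t2.length)
              + pvVal [] (max ([] : List Char).length t2.length) from by simp [pvVal]]
      exact pv_step i 0 c2.toNat (by norm_num) (hb2 c2 List.mem_cons_self)
        [] t2 _ (pv_val_bound _ _ (by simp) hm1) (pv_val_bound _ _ hb2' hm2)
        _ (IH [] t2 hlen' (by simp) hb2' (i + 1))
    · -- c1 :: t1 vs []
      have hlen' : t1.length + ([] : List Char).length ≤ n := by
        simp only [List.length_nil, List.length_cons] at hlen ⊢; omega
      have hM : max (c1 :: t1).length ([] : List Char).length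
          = max t1.length ([] : List Char).length + 1 := by
        simp only [List.length_nil, List.length_cons]; omega
      have hm1 : t1.length ≤ max t1.length ([] : List Char).length := le_max_left _ _
      have hm2 : ([] : List Char).length ≤ max t1.length ([] : List Char).length :=
        le_max_right _ _
      have hb1' : ∀ c ∈ t1, c.toNat < 256 := fun x hx => hb1 x (List.mem_cons_of_mem _ hx)
      rw [pvALoop, hM, pv_val_cons c1 t1,
        show pvVal [] (max t1.length ([] : List Char).length + 1)
            = 0 * 2 ^ (8 * max t1.length ([] : List Char).length)
              + pvVal [] (max t1.length ([] : List Char).length) from by simp [pvVal]]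
      exact pv_step i c1.toNat 0 (hb1 c1 List.mem_cons_self) (by norm_num)
        t1 [] _ (pv_val_bound _ _ hb1' hm1) (pv_val_bound _ _ (by simp) hm2)
        _ (IH t1 [] hlen' hb1' (by simp) (i + 1))
    · -- c1 :: t1 vs c2 :: t2
      have hlen' : t1.length + t2.length ≤ n := by
        simp only [List.length_cons] at hlen; omega
      have hM : max (c1 :: t1).length (c2 :: t2).length = max t1.length t2.length + 1 := by
        simp only [List.length_cons]; omega
      have hb1' : ∀ c ∈ t1, c.toNat < 256 := fun x hx => hb1 x (List.mem_cons_of_mem _ hx)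
      have hb2' : ∀ c ∈ t2, c.toNat < 256 := fun x hx => hb2 x (List.mem_cons_of_mem _ hx)
      rw [pvALoop, hM, pv_val_cons c1 t1, pv_val_cons c2 t2]
      exact pv_step i c1.toNat c2.toNat (hb1 c1 List.mem_cons_self)
        (hb2 c2 List.mem_cons_self) t1 t2 _
        (pv_val_bound _ _ hb1' (le_max_left _ _)) (pv_val_bound _ _ hb2' (le_max_right _ _))
        _ (IH t1 t2 hlen' hb1' hb2' (i + 1))

theorem pv_dom_bound (s : String) (hs : pvDomStr s = true) :
    ∀ c ∈ s.toList, c.toNat < 256 := by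
  intro c hc
  have h := (List.all_eq_true.mp hs) c hc
  simp only [pvDomChar, Bool.or_eq_true, Bool.and_eq_true, decide_eq_true_eq,
    beq_iff_eq] at h
  omega

theorem pv_align (l : List Char) (m : Nat) (hb : ∀ c ∈ l, c.toNat < 256)
    (hm : l.length ≤ m) : pvEnc l <<< ((m - l.length) * 8) = pvVal l m := by
  rw [pv_enc_eq l hb, Nat.shiftLeft_eq]
  have hp : (2 : Nat) ^ ((m - l.length) * 8) = 256 ^ (m - l.length) := by
    rw [show (256 : Nat) = 2 ^ 8 from rfl, ← pow_mul, mul_comm]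
  rw [hp]
  have h := pv_val_eq_enc l (m - l.length)
  rw [show l.length + (m - l.length) = m from by omega] at h
  rw [h]

-- ===== VERDICT (by name: the statement is the Claim_ definition above) =====
theorem first_bit_diff_py_spec : Claim_equal_first_bit_diff_py := by
  intro key1 key2 hdom
  have hdd : pvDomStr key1 = true ∧ pvDomStr key2 = true := by
    have := hdom
    unfold Dom_first_bit_diff_py at this
    exact Bool.and_eq_true_iff.mp this
  have hb1 := pv_dom_bound key1 hdd.1
  have hb2 := pv_dom_bound key2 hdd.2
  unfold Spec_first_bit_diff_py first_bit_diff_py first_bit_diff_py_alt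
  rw [pv_main (key1.toList.length + key2.toList.length) key1.toList key2.toList le_rfl
    hb1 hb2 0]
  simp only []
  rw [pv_align key1.toList (max key1.toList.length key2.toList.length) hb1 (le_max_left _ _),
    pv_align key2.toList (max key1.toList.length key2.toList.length) hb2 (le_max_right _ _)]
  by_cases hX : pvVal key1.toList (max key1.toList.length key2.toList.length)
      ^^^ pvVal key2.toList (max key1.toList.length key2.toList.length) = 0
  · simp [hX]
  · simp only [if_neg hX]
    push_cast
    ring
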